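-- pv_equiv track=rewrite | github.com/huijiecai/stock-skills | .cursor/skills/module-bench-diagnosis/scripts/fetch_gitlab_log.py | extract_tsan_reports
-- ===== SOURCE A (Python) =====
-- def extract_tsan_reports(log_content):
--     """
--     提取 ThreadSanitizer 详细报告
--
--     返回：(summary_lines, detailed_issues)
--     """
--     lines = log_content.split('\n')
--
--     # 提取 SUMMARY 行
--     summary_lines = []
--     for line in lines:
--         if 'SUMMARY: ThreadSanitizer' in line:
--             summary_lines.append(line)
--
--     # 提取详细的 Issue 报告
--     detailed_issues = []
--     in_issue = False
--     current_issue = []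
--     issue_count = 0
--
--     for i, line in enumerate(lines):
--         # 检测 Issue 开始
--         if 'WARNING: ThreadSanitizer:' in line:
--             if current_issue:
--                 detailed_issues.append('\n'.join(current_issue))
--             current_issue = [f"[Issue #{issue_count + 1}]", line]
--             in_issue = True
--             issue_count += 1
--             continue
--
--         # 检测 Issue 结束（遇到 SUMMARY 行）
--         if in_issue and 'SUMMARY: ThreadSanitizer' in line:
--             current_issue.append(line)
--             detailed_issues.append('\n'.join(current_issue))
--             current_issue = []
--             in_issue = False
--             continue
--
--         # 收集 Issue 内容
--         if in_issue:
--             current_issue.append(line)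
--             # 限制每个 issue 最多 100 行
--             if len(current_issue) > 100:
--                 current_issue.append("... (truncated)")
--                 detailed_issues.append('\n'.join(current_issue))
--                 current_issue = []
--                 in_issue = False
--
--     # 处理最后一个 issue
--     if current_issue:
--         detailed_issues.append('\n'.join(current_issue))
--
--     return summary_lines, detailed_issues
-- ===== SOURCE B (Python) =====
-- def extract_tsan_reports(log_content):
--     """
--     提取 ThreadSanitizer 详细报告
--
--     返回：(summary_lines, detailed_issues)
--     """
--     lines = log_content.split('\n')
--
--     summary_lines = [l for l in lines if 'SUMMARY: ThreadSanitizer' in l]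
--
--     detailed_issues = []
--     n = 0
--     m = len(lines)
--     i = 0
--     while i < m:
--         if 'WARNING: ThreadSanitizer:' not in lines[i]:
--             i += 1
--             continue
--         n += 1
--         block = ['[Issue #%d]' % n, lines[i]]
--         j = i + 1
--         content = 0
--         closed = False
--         while j < m:
--             line = lines[j]
--             if 'WARNING: ThreadSanitizer:' in line:
--                 break
--             block.append(line)
--             j += 1
--             if 'SUMMARY: ThreadSanitizer' in line:
--                 closed = True
--                 break
--             content += 1
--             if content == 99:
--                 block.append('... (truncated)')
--                 closed = True
--                 break
--         detailed_issues.append('\n'.join(block))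
--         if closed:
--             while j < m and 'WARNING: ThreadSanitizer:' not in lines[j]:
--                 j += 1
--         i = j
--     return summary_lines, detailed_issues
-- ===== Notes on version B (the rewrite author's own statement) =====
-- stated objective: alternative
-- what changed: A's single fold over all lines with a current_issue/in_issue/issue_count state machine and a final flush is replaced by a list comprehension for summary lines plus an explicit two-level scan: an outer loop that finds each WARNING line and an inner loop that collects that issue's block until a SUMMARY, the next WARNING or 99 content lines, then skips ahead.
import Mathlib
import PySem

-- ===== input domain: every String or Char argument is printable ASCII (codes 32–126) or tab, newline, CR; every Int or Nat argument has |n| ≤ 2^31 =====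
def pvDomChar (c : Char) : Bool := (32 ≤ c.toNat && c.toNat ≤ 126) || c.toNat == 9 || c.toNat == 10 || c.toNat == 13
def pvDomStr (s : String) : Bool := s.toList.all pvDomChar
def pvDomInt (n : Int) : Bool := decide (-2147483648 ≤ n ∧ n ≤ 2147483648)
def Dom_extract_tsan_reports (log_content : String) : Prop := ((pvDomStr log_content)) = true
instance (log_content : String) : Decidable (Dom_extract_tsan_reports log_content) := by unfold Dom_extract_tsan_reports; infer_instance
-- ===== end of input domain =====

-- B replaces A's single stateful flag-driven fold by a comprehension for the summaries plus an
-- explicit two-level scan (outer issue finder / inner block collector) for the detailed issues;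
-- objective: alternative decomposition, same cost.

-- shared substring tests ('WARNING: ThreadSanitizer:' in line / 'SUMMARY: ThreadSanitizer' in line)
def pvWarn (s : String) : Bool := PySem.Str.isIn "WARNING: ThreadSanitizer:" s
def pvSumm (s : String) : Bool := PySem.Str.isIn "SUMMARY: ThreadSanitizer" s

-- ===== PORT A =====
-- log_content.split('\n') — sep is the nonempty literal '\n', so Chars.splitOn is exact
def pvLines (s : String) : List String := (PySem.Chars.splitOn s.toList "\n".toList).map String.ofList

-- state: (detailed_issues, current_issue, in_issue, issue_count); one step of A's second for-loop
def pvStepA (st : List String × List String × Bool × Int) (line : String) :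
    List String × List String × Bool × Int :=
  match st with
  | (acc, cur, inI, cnt) =>
    if pvWarn line then
      ((if cur ≠ [] then acc ++ [PySem.Str.join "\n" cur] else acc),
       ["[Issue #" ++ PySem.Int.toStr (cnt + 1) ++ "]", line], true, cnt + 1)
    else if inI && pvSumm line then
      (acc ++ [PySem.Str.join "\n" (cur ++ [line])], [], false, cnt)
    else if inI then
      let cur' := cur ++ [line]
      if cur'.length > 100 then
        (acc ++ [PySem.Str.join "\n" (cur' ++ ["... (truncated)"])], [], false, cnt)
      else (acc, cur', inI, cnt)
    else (acc, cur, inI, cnt)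

def extract_tsan_reports (log_content : String) : List String × List String :=
  let lines := pvLines log_content
  let summary_lines := lines.foldl (fun acc line => if pvSumm line then acc ++ [line] else acc) []
  match lines.foldl pvStepA ([], [], false, 0) with
  | (detailed, cur, _, _) =>
    (summary_lines, if cur ≠ [] then detailed ++ [PySem.Str.join "\n" cur] else detailed)

-- ===== PORT B =====
-- Source B's inner while-loop: collect one block; returns (block, closed, remaining lines)
def pvInner (block : List String) (content : Int) (rest : List String) :
    List String × Bool × List String :=
  match rest with
  | [] => (block, false, [])
  | line :: rest' =>
    if pvWarn line then (block, false, line :: rest')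
    else
      let block' := block ++ [line]
      if pvSumm line then (block', true, rest')
      else if content + 1 == 99 then (block' ++ ["... (truncated)"], true, rest')
      else pvInner block' (content + 1) rest'

-- Source B's skip-forward-to-next-WARNING while-loop
def pvSkip (l : List String) : List String := l.dropWhile (fun x => !pvWarn x)

theorem pvInner_rest_length_le (block : List String) (content : Int) (rest : List String) :
    ((pvInner block content rest).2.2).length ≤ rest.length := by
  induction rest generalizing block content with
  | nil => simp [pvInner]
  | cons line rest' ih =>
    simp only [pvInner]
    split_ifs with h1 h2 h3
    · simp
    · simp
    · simp
    · exact Nat.le_succ_of_le (ih _ _)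

-- Source B's outer while-loop over i
def pvOuter (n : Int) (rest : List String) : List String :=
  match rest with
  | [] => []
  | line :: rest' =>
    if pvWarn line then
      let r := pvInner ["[Issue #" ++ PySem.Int.toStr (n + 1) ++ "]", line] 0 rest'
      PySem.Str.join "\n" r.1 :: pvOuter (n + 1) (if r.2.1 then pvSkip r.2.2 else r.2.2)
    else pvOuter n rest'
termination_by rest.length
decreasing_by
  · refine Nat.lt_succ_of_le ?_
    split
    · exact le_trans (List.length_dropWhile_le _ _) (pvInner_rest_length_le _ _ _)
    · exact pvInner_rest_length_le _ _ _
  · simp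

def extract_tsan_reports_alt (log_content : String) : List String × List String :=
  let lines := pvLines log_content
  (lines.filter (fun l => pvSumm l), pvOuter 0 lines)

-- ===== PRECONDITION & SPEC =====
def Spec_extract_tsan_reports (log_content : String) (out : List String × List String) : Prop := out = extract_tsan_reports_alt log_content
instance (log_content : String) (out : List String × List String) : Decidable (Spec_extract_tsan_reports log_content out) := by unfold Spec_extract_tsan_reports; infer_instance

-- ===== CLAIM (what is proved, stated in full; the proofs are below) =====
def Claim_equal_extract_tsan_reports : Prop := ∀ (log_content : String), Dom_extract_tsan_reports log_content → Spec_extract_tsan_reports log_content (extract_tsan_reports log_content)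

-- ===== LEMMAS AND PROOFS =====

-- finish of A's fold state: the trailing 'if current_issue:' flush
def pvFinish (st : List String × List String × Bool × Int) : List String :=
  match st with
  | (acc, cur, _, _) => if cur ≠ [] then acc ++ [PySem.Str.join "\n" cur] else acc

theorem pvOuter_skip (n : Int) (l : List String) : pvOuter n (pvSkip l) = pvOuter n l := by
  induction l with
  | nil => simp [pvSkip]
  | cons line l' ih =>
    by_cases h : pvWarn line = true
    · simp [pvSkip, List.dropWhile, h]
    · simp only [pvSkip, List.dropWhile] at *
      simp [h, pvOuter, ih]

-- the combined loop-correspondence invariant, by strong induction on the remaining lines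
theorem pvMain : ∀ (k : Nat) (rest : List String), rest.length ≤ k →
    (∀ (acc : List String) (n : Int),
      pvFinish (rest.foldl pvStepA (acc, [], false, n)) = acc ++ pvOuter n rest) ∧
    (∀ (acc block : List String) (n content : Int),
      0 ≤ content → content ≤ 98 → (block.length : Int) = content + 2 →
      pvFinish (rest.foldl pvStepA (acc, block, true, n)) =
        acc ++ (PySem.Str.join "\n" (pvInner block content rest).1 ::
          pvOuter n (if (pvInner block content rest).2.1
                     then pvSkip (pvInner block content rest).2.2
                     else (pvInner block content rest).2.2))) := by
  intro k
  induction k with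
  | zero =>
    intro rest hlen
    have : rest = [] := List.eq_nil_of_length_eq_zero (Nat.le_zero.mp hlen)
    subst this
    constructor
    · intro acc n; simp [pvFinish, pvOuter]
    · intro acc block n content _ _ hb
      have hbne : block ≠ [] := by
        intro h; subst h; simp at hb; omega
      simp [pvFinish, pvInner, pvOuter, hbne]
  | succ k ih =>
    intro rest hlen
    match rest with
    | [] =>
      constructor
      · intro acc n; simp [pvFinish, pvOuter]
      · intro acc block n content _ _ hb
        have hbne : block ≠ [] := by intro h; subst h; simp at hb; omega
        simp [pvFinish, pvInner, pvOuter, hbne]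
    | line :: rest' =>
      have hlen' : rest'.length ≤ k := by simpa using Nat.lt_succ_iff.mp (Nat.lt_of_lt_of_le (by simp) hlen)
      constructor
      · intro acc n
        by_cases hw : pvWarn line = true
        · -- WARNING starts a block; cur = [] so nothing is flushed
          simp only [List.foldl_cons, pvStepA, hw, if_pos, ne_eq, not_true_eq_false, if_false]
          rw [(ih rest' hlen').2 acc _ (n + 1) 0 (by norm_num) (by norm_num) (by simp)]
          simp [pvOuter, hw]
        · -- idle state ignores the line
          simp only [List.foldl_cons, pvStepA, hw]
          rw [show pvOuter n (line :: rest') = pvOuter n rest' from by simp [pvOuter, hw]]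
          simpa [hw] using (ih rest' hlen').1 acc n
      · intro acc block n content hc0 hc98 hb
        have hbne : block ≠ [] := by intro h; subst h; simp at hb; omega
        by_cases hw : pvWarn line = true
        · -- WARNING: flush block, start a new one
          simp only [List.foldl_cons, pvStepA, hw, if_pos, hbne, ne_eq, not_false_eq_true]
          rw [(ih rest' hlen').2 (acc ++ [PySem.Str.join "\n" block]) _ (n + 1) 0
            (by norm_num) (by norm_num) (by simp)]
          simp [pvInner, hw, pvOuter]
        · by_cases hs : pvSumm line = true
          · -- SUMMARY closes the block
            simp only [List.foldl_cons, pvStepA, hw, hs, Bool.true_and, if_true, if_false,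
              Bool.false_eq_true]
            rw [(ih rest' hlen').1 (acc ++ [PySem.Str.join "\n" (block ++ [line])]) n]
            simp [pvInner, hw, hs, pvOuter_skip]
          · by_cases ht : content + 1 = 99
            · -- truncation closes the block
              have hlen101 : (block ++ [line]).length > 100 := by
                simp; omega
              simp only [List.foldl_cons, pvStepA, hw, hs, Bool.false_eq_true, Bool.and_false,
                if_false, hlen101, if_pos]
              rw [(ih rest' hlen').1
                (acc ++ [PySem.Str.join "\n" (block ++ [line] ++ ["... (truncated)"])]) n]
              simp [pvInner, hw, hs, ht, pvOuter_skip]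
            · -- ordinary content line
              have hlenle : ¬ (block ++ [line]).length > 100 := by simp; omega
              simp only [List.foldl_cons, pvStepA, hw, hs, Bool.false_eq_true, Bool.and_false,
                if_false, if_true, hlenle]
              rw [(ih rest' hlen').2 acc (block ++ [line]) n (content + 1)
                (by omega) (by omega) (by simp; omega)]
              simp [pvInner, hw, hs, ht]

-- ===== VERDICT (by name: the statement is the Claim_ definition above) =====
theorem extract_tsan_reports_spec : Claim_equal_extract_tsan_reports := by
  intro log_content _
  unfold Spec_extract_tsan_reports extract_tsan_reports extract_tsan_reports_alt
  have h := (pvMain (pvLines log_content).length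
      (pvLines log_content) (le_refl _)).1 [] 0
  rcases hfold : (pvLines log_content).foldl pvStepA ([], [], false, 0) with
    ⟨detailed, cur, inI, cnt⟩
  rw [hfold] at h
  simp only [pvFinish] at h
  simp only [hfold]
  refine Prod.ext ?_ ?_
  · simpa using PySem.List.foldl_append_if_eq_filter (fun l => pvSumm l) (l := pvLines log_content) (acc := [])
  · simpa using h
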